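-- pv_equiv track=rewrite | github.com/jguzauckas/advent-of-code | 2024/Python/12.py | mins_maxs
-- ===== SOURCE A (Python) =====
-- def mins_maxs(plots):
--     min_y = plots[0][0]
--     max_y = plots[0][0]
--     min_x = plots[0][1]
--     max_x = plots[0][1]
--     for plot in plots:
--         if plot[0] < min_y:
--             min_y = plot[0]
--         if plot[0] > max_y:
--             max_y = plot[0]
--         if plot[1] < min_x:
--             min_x = plot[1]
--         if plot[1] > max_x:
--             max_x = plot[1]
--     return (min_y, max_y, min_x, max_x)
-- ===== SOURCE B (Python) =====
-- def mins_maxs(plots):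
--     ys = [p[0] for p in plots]
--     xs = [p[1] for p in plots]
--     return (min(ys), max(ys), min(xs), max(xs))
-- ===== Notes on version B (the rewrite author's own statement) =====
-- stated objective: idiomatic
-- what changed: Replaced the fused single loop maintaining four running extrema with a column transpose followed by four built-in min/max scans.
import Mathlib
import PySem

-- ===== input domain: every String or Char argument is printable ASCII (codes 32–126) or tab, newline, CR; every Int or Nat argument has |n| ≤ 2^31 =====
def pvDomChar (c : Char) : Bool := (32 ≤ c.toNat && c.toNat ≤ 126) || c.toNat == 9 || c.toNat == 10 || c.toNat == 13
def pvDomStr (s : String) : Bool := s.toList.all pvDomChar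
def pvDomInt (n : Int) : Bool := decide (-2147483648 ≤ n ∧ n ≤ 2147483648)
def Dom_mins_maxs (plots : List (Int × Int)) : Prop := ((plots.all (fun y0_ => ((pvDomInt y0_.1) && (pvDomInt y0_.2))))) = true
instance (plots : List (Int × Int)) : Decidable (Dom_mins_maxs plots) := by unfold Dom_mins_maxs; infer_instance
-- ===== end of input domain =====

-- B replaces A's fused single loop over four running extrema with a column transpose
-- followed by four separate built-in min/max scans (idiomatic; return value only).

-- ===== PORT A =====
-- A: read plots[0] (IndexError on [] — excluded by Pre_), then one loop updating
-- four running extrema with four independent ifs.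
def mins_maxs (plots : List (Int × Int)) : Int × Int × Int × Int :=
  let h := plots.headD (0, 0)   -- plots[0]; Pre_ guarantees plots ≠ []
  plots.foldl
    (fun (s : Int × Int × Int × Int) p =>
      let my := if p.1 < s.1 then p.1 else s.1
      let My := if p.1 > s.2.1 then p.1 else s.2.1
      let mx := if p.2 < s.2.2.1 then p.2 else s.2.2.1
      let Mx := if p.2 > s.2.2.2 then p.2 else s.2.2.2
      (my, My, mx, Mx))
    (h.1, h.1, h.2, h.2)

-- ===== PORT B =====
def mins_maxs_alt (plots : List (Int × Int)) : Int × Int × Int × Int :=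
  let ys := plots.map Prod.fst
  let xs := plots.map Prod.snd
  ((PySem.List.min? ys (fun y => y)).getD 0,
   (PySem.List.max? ys (fun y => y)).getD 0,
   (PySem.List.min? xs (fun y => y)).getD 0,
   (PySem.List.max? xs (fun y => y)).getD 0)

-- ===== PRECONDITION & SPEC =====
-- Pre_ excludes only the empty list, on which A raises IndexError (B raises ValueError).
def Pre_mins_maxs (plots : List (Int × Int)) : Prop := plots ≠ []
instance (plots : List (Int × Int)) : Decidable (Pre_mins_maxs plots) := by unfold Pre_mins_maxs; infer_instance
def pvWitness_mins_maxs : (List (Int × Int)) := [(1, 2), (0, 5)]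
def Spec_mins_maxs (plots : List (Int × Int)) (out : Int × Int × Int × Int) : Prop := out = mins_maxs_alt plots
instance (plots : List (Int × Int)) (out : Int × Int × Int × Int) : Decidable (Spec_mins_maxs plots out) := by unfold Spec_mins_maxs; infer_instance

-- ===== CLAIM (what is proved, stated in full; the proofs are below) =====
def Claim_equal_mins_maxs : Prop := ∀ (plots : List (Int × Int)), Dom_mins_maxs plots → Pre_mins_maxs plots → Spec_mins_maxs plots (mins_maxs plots)

-- ===== LEMMAS AND PROOFS =====

-- A's fused fold splits into four independent folds.
theorem pv_fold_split (l : List (Int × Int)) (a b c d : Int) :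
    l.foldl
      (fun (s : Int × Int × Int × Int) p =>
        let my := if p.1 < s.1 then p.1 else s.1
        let My := if p.1 > s.2.1 then p.1 else s.2.1
        let mx := if p.2 < s.2.2.1 then p.2 else s.2.2.1
        let Mx := if p.2 > s.2.2.2 then p.2 else s.2.2.2
        (my, My, mx, Mx))
      (a, b, c, d)
    = ((l.map Prod.fst).foldl min a, (l.map Prod.fst).foldl max b,
       (l.map Prod.snd).foldl min c, (l.map Prod.snd).foldl max d) := by
  induction l generalizing a b c d with
  | nil => rfl
  | cons p t ih =>
      have h1 : (if p.1 < a then p.1 else a) = min a p.1 := by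
        simp only [min_def]; split_ifs <;> omega
      have h2 : (if p.1 > b then p.1 else b) = max b p.1 := by
        simp only [max_def]; split_ifs <;> omega
      have h3 : (if p.2 < c then p.2 else c) = min c p.2 := by
        simp only [min_def]; split_ifs <;> omega
      have h4 : (if p.2 > d then p.2 else d) = max d p.2 := by
        simp only [max_def]; split_ifs <;> omega
      simp only [List.foldl_cons, List.map_cons, ih, h1, h2, h3, h4]

theorem mins_maxs_eq (h : Int × Int) (t : List (Int × Int)) :
    mins_maxs (h :: t) = mins_maxs_alt (h :: t) := by
  simp only [mins_maxs, mins_maxs_alt, List.headD, pv_fold_split,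
    PySem.List.min?_id_cons, PySem.List.max?_id_cons, List.map_cons,
    List.foldl_cons, Option.getD_some]
  simp

-- ===== VERDICT (by name: the statement is the Claim_ definition above) =====
theorem mins_maxs_spec : Claim_equal_mins_maxs := by
  intro plots _ hpre
  cases plots with
  | nil => exact absurd rfl hpre
  | cons h t => exact mins_maxs_eq h t
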